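-- pv_equiv track=rewrite | github.com/liusuan110/LabGuardian-Server | app/pipeline/stages/s1b_pin_detect.py | _view_ids_from_images
-- ===== SOURCE A (Python) =====
-- from typing import Any, Dict, List
--
-- def _view_ids_from_images(images_b64: List[str]) -> List[str]:
--     defaults = ["top", "left_front", "right_front"]
--     if not images_b64:
--         return ["top"]
--     view_ids = defaults[: len(images_b64)]
--     if len(images_b64) > len(defaults):
--         for idx in range(len(defaults), len(images_b64)):
--             view_ids.append(f"aux_view_{idx - len(defaults) + 1}")
--     return view_ids
-- ===== SOURCE B (Python) =====
-- def _view_ids_from_images(images_b64):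
--     if not images_b64:
--         return ["top"]
--     out = []
--     pending = ["top", "left_front", "right_front"]
--     aux_counter = 1
--     for _img in images_b64:
--         if pending:
--             out.append(pending.pop(0))
--         else:
--             out.append(f"aux_view_{aux_counter}")
--             aux_counter += 1
--     return out
-- ===== Notes on version B (the rewrite author's own statement) =====
-- stated objective: alternative
-- what changed: Instead of slicing the defaults to the input length and then running an index-arithmetic loop over range(len(defaults), n), B walks the images themselves with a state machine that drains a queue of pending default labels and, once the queue is empty, increments an aux counter - no indices, lengths in arithmetic, or slices.
import Mathlib
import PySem

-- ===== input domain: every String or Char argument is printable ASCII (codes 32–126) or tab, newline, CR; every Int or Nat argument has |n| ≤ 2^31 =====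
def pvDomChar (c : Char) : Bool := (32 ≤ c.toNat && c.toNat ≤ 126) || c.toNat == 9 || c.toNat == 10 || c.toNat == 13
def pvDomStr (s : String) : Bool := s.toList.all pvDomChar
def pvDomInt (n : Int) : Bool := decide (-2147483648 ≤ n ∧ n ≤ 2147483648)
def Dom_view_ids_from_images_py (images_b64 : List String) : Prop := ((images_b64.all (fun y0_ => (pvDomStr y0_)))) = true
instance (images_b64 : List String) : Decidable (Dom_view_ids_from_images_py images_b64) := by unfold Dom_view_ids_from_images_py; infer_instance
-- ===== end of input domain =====

-- ===== PORT A =====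
-- B replaces A's slice-plus-index-loop by a queue-draining state machine over the images (alternative decomposition, same cost).
def view_ids_from_images_py (images_b64 : List String) : List String :=
  let defaults : List String := ["top", "left_front", "right_front"]
  if images_b64.isEmpty then ["top"]
  else
    let view_ids := PySem.List.slice defaults none (some (images_b64.length : Int))
    if (images_b64.length : Int) > (defaults.length : Int) then
      (PySem.List.pyRange (defaults.length : Int) (images_b64.length : Int) 1).foldl
        (fun acc idx => acc ++ ["aux_view_" ++ PySem.Int.toStr (idx - (defaults.length : Int) + 1)])
        view_ids
    else view_ids

-- ===== PORT B =====
def view_ids_from_images_py_alt (images_b64 : List String) : List String :=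
  if images_b64.isEmpty then ["top"]
  else
    (images_b64.foldl
      (fun (st : List String × List String × Int) _img =>
        match st with
        | (out, p :: ps, k) => (out ++ [p], ps, k)
        | (out, [], k) => (out ++ ["aux_view_" ++ PySem.Int.toStr k], [], k + 1))
      ([], ["top", "left_front", "right_front"], 1)).1

-- ===== PRECONDITION & SPEC =====
def Spec_view_ids_from_images_py (images_b64 : List String) (out : List String) : Prop := out = view_ids_from_images_py_alt images_b64
instance (images_b64 : List String) (out : List String) : Decidable (Spec_view_ids_from_images_py images_b64 out) := by unfold Spec_view_ids_from_images_py; infer_instance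

-- ===== CLAIM (what is proved, stated in full; the proofs are below) =====
def Claim_equal_view_ids_from_images_py : Prop := ∀ (images_b64 : List String), Dom_view_ids_from_images_py images_b64 → Spec_view_ids_from_images_py images_b64 (view_ids_from_images_py images_b64)

-- ===== LEMMAS AND PROOFS =====

-- spec of B's loop body as a pure function of pending list, counter and remaining length
def viiLabels : List String → Int → Nat → List String
  | _, _, 0 => []
  | p :: ps, k, n + 1 => p :: viiLabels ps k n
  | [], k, n + 1 => ("aux_view_" ++ PySem.Int.toStr k) :: viiLabels [] (k + 1) n

lemma viiLabels_nil (k : Int) (n : Nat) :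
    viiLabels [] k n = (List.range n).map (fun (i : Nat) => "aux_view_" ++ PySem.Int.toStr (k + (i : Int))) := by
  induction n generalizing k with
  | zero => rfl
  | succ m ih =>
      rw [List.range_succ_eq_map, List.map_cons, List.map_map]
      simp only [viiLabels, ih]
      congr 1
      · norm_num
      · apply List.map_congr_left
        intro i _
        simp only [Function.comp]
        congr 2
        push_cast
        ring

lemma vii_foldl (imgs : List String) (out pending : List String) (k : Int) :
    (imgs.foldl
      (fun (st : List String × List String × Int) _img =>
        match st with
        | (o, p :: ps, k) => (o ++ [p], ps, k)
        | (o, [], k) => (o ++ ["aux_view_" ++ PySem.Int.toStr k], [], k + 1))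
      (out, pending, k)).1 = out ++ viiLabels pending k imgs.length := by
  induction imgs generalizing out pending k with
  | nil => simp [viiLabels]
  | cons x xs ih =>
      cases pending with
      | nil => simp [List.foldl_cons, ih, viiLabels]
      | cons p ps => simp [List.foldl_cons, ih, viiLabels]

lemma vii_A_core (n : Nat) (hn : 1 ≤ n) :
    (if (n : Int) > 3 then
      (PySem.List.pyRange 3 (n : Int) 1).foldl
        (fun acc idx => acc ++ ["aux_view_" ++ PySem.Int.toStr (idx - 3 + 1)])
        ((["top", "left_front", "right_front"] : List String).take n)
    else (["top", "left_front", "right_front"] : List String).take n)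
    = viiLabels ["top", "left_front", "right_front"] 1 n := by
  by_cases h : n ≤ 3
  · interval_cases n <;> decide
  · rw [if_pos (by exact_mod_cast by omega)]
    rw [PySem.List.foldl_append_singleton_eq_map, PySem.List.pyRange_one]
    rcases Nat.exists_eq_add_of_le (show 3 ≤ n by omega) with ⟨m, hm⟩
    subst hm
    have h1 : viiLabels ["top", "left_front", "right_front"] 1 (3 + m)
        = ["top", "left_front", "right_front"] ++ viiLabels [] 1 m := by
      rw [Nat.add_comm 3 m]
      simp [viiLabels]
    rw [h1, List.take_of_length_le (by simp)]
    congr 1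
    have he : ((↑(3 + m) : Int) - 3).toNat = m := by omega
    rw [he, viiLabels_nil, List.map_map]
    apply List.map_congr_left
    intro i _
    simp only [Function.comp]
    congr 2
    ring

-- ===== VERDICT (by name: the statement is the Claim_ definition above) =====
theorem view_ids_from_images_py_spec : Claim_equal_view_ids_from_images_py := by
  intro images_b64 _
  unfold Spec_view_ids_from_images_py view_ids_from_images_py view_ids_from_images_py_alt
  by_cases h : images_b64.isEmpty
  · simp [h]
  · simp only [h, Bool.false_eq_true, if_neg, not_false_iff]
    rw [vii_foldl, PySem.List.slice_to_natCast]
    have hn : 1 ≤ images_b64.length := by rcases images_b64 with _ | _ <;> simp_all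
    have := vii_A_core images_b64.length hn
    simpa using this
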